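-- pv_equiv track=rewrite | github.com/roarceus/algo-atlas | src/algo_atlas/languages/kotlin.py | _parse_kotlin_params
-- ===== SOURCE A (Python) =====
-- def _split_kotlin_params(params_str: str) -> list[str]:
--     """Split param string by comma, ignoring commas inside angle brackets."""
--     parts: list[str] = []
--     depth = 0
--     current: list[str] = []
--     for ch in params_str:
--         if ch == "<":
--             depth += 1
--             current.append(ch)
--         elif ch == ">":
--             depth -= 1
--             current.append(ch)
--         elif ch == "," and depth == 0:
--             part = "".join(current).strip()
--             if part:
--                 parts.append(part)
--             current = []
--         else:
--             current.append(ch)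
--     part = "".join(current).strip()
--     if part:
--         parts.append(part)
--     return parts
--
-- def _parse_kotlin_params(params_str: str) -> list[dict]:
--     """Parse Kotlin param string into list of {name, type} dicts.
--
--     Kotlin params are formatted as `name: Type`, e.g. `nums: IntArray`.
--     """
--     result = []
--     for param in _split_kotlin_params(params_str):
--         param = param.strip()
--         if ": " in param:
--             name, type_ = param.split(": ", 1)
--             result.append({"name": name.strip(), "type": type_.strip()})
--     return result
-- ===== SOURCE B (Python) =====
-- def _flush(result: list, acc: list) -> None:
--     """Join buffered comma-split pieces back together, strip, and emit a name/type dict."""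
--     seg = ",".join(acc).strip()
--     if ": " in seg:
--         name, type_ = seg.split(": ", 1)
--         result.append({"name": name.strip(), "type": type_.strip()})
--
--
-- def _parse_kotlin_params(params_str: str) -> list[dict]:
--     """Parse Kotlin param string into list of {name, type} dicts.
--
--     Different algorithm: split on EVERY comma first, then greedily merge
--     consecutive pieces until their angle-bracket open/close counts balance (a comma sits at
--     angle-bracket depth 0 exactly when the text before it is balanced),
--     flushing each balanced group as one parameter.
--     """
--     result: list = []
--     acc: list[str] = []
--     bal = 0
--     for piece in params_str.split(","):
--         acc.append(piece)
--         bal += piece.count("<") - piece.count(">")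
--         if bal == 0:
--             _flush(result, acc)
--             acc = []
--     _flush(result, acc)
--     return result
-- ===== Notes on version B (the rewrite author's own statement) =====
-- stated objective: faster
-- what changed: Replaces A's character-by-character depth-tracking scan with a split-on-every-comma pass followed by a greedy merge of consecutive pieces until their angle-bracket open/close counts balance (a comma is at depth 0 iff the text before it is bracket-balanced), flushing each balanced group as one name/type dict.
import Mathlib
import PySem

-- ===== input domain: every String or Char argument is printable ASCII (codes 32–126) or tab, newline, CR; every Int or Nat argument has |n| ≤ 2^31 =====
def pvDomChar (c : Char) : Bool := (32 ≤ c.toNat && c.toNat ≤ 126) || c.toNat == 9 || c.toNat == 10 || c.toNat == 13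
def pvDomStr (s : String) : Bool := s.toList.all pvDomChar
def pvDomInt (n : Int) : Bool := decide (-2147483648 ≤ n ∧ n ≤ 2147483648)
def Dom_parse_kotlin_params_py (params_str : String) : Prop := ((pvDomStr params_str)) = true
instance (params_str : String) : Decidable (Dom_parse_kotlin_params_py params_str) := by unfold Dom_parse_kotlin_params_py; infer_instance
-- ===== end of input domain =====

-- B replaces A's split-then-parse char scan with depth tracking by: split on EVERY comma,
-- then merge consecutive pieces until angle-bracket open/close counts balance, flushing each group as a dict.
-- ===== PORT A =====
-- one loop step of _split_kotlin_params: state (parts, depth, current)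
def pvStepA (st : List (List Char) × Int × List Char) (ch : Char) :
    List (List Char) × Int × List Char :=
  let (parts, depth, cur) := st
  if ch = '<' then (parts, depth + 1, cur ++ [ch])
  else if ch = '>' then (parts, depth - 1, cur ++ [ch])
  else if ch = ',' ∧ depth = 0 then
    let part := PySem.Chars.strip cur
    (if part = [] then parts else parts ++ [part], depth, [])
  else (parts, depth, cur ++ [ch])

-- _split_kotlin_params: the loop, then the final flush
def pvSplitKotlin (params_str : String) : List (List Char) :=
  let st := params_str.toList.foldl pvStepA ([], 0, [])
  let part := PySem.Chars.strip st.2.2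
  if part = [] then st.1 else st.1 ++ [part]

-- body of _parse_kotlin_params's loop; split(": ", 1) has exactly two pieces when ": " in param
def pvParseA (result : List (List (String × String))) (param : List Char) :
    List (List (String × String)) :=
  let param := PySem.Chars.strip param
  if PySem.Chars.isIn [':', ' '] param then
    let pieces := PySem.Chars.splitOnMax param [':', ' '] 1
    result ++ [[("name", String.ofList (PySem.Chars.strip (pieces.headD []))),
                ("type", String.ofList (PySem.Chars.strip (pieces.tail.headD [])))]]
  else result

def parse_kotlin_params_py (params_str : String) : List (List (String × String)) :=
  (pvSplitKotlin params_str).foldl pvParseA []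

-- ===== PORT B =====
-- _flush: join the buffered comma-split pieces back with ',', strip, emit the dict if ': ' occurs
def pvFlushB (result : List (List (String × String))) (acc : List (List Char)) :
    List (List (String × String)) :=
  let seg := PySem.Chars.strip (PySem.Chars.join [','] acc)
  if PySem.Chars.isIn [':', ' '] seg then
    let pieces := PySem.Chars.splitOnMax seg [':', ' '] 1
    result ++ [[("name", String.ofList (PySem.Chars.strip (pieces.headD []))),
                ("type", String.ofList (PySem.Chars.strip (pieces.tail.headD [])))]]
  else result

-- one loop step of B over the comma-split pieces: state (result, bal, acc)
def pvStepB (st : List (List (String × String)) × Int × List (List Char)) (p : List Char) :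
    List (List (String × String)) × Int × List (List Char) :=
  let (res, bal, acc) := st
  let acc' := acc ++ [p]
  let bal' := bal + (PySem.Chars.count p ['<'] : Int) - (PySem.Chars.count p ['>'] : Int)
  if bal' = 0 then (pvFlushB res acc', bal', ([] : List (List Char)))
  else (res, bal', acc')

def parse_kotlin_params_py_alt (params_str : String) : List (List (String × String)) :=
  let st := (PySem.Chars.splitOn params_str.toList [',']).foldl pvStepB ([], 0, [])
  pvFlushB st.1 st.2.2

-- ===== PRECONDITION & SPEC =====
def Spec_parse_kotlin_params_py (params_str : String) (out : List (List (String × String))) : Prop := out = parse_kotlin_params_py_alt params_str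
instance (params_str : String) (out : List (List (String × String))) : Decidable (Spec_parse_kotlin_params_py params_str out) := by unfold Spec_parse_kotlin_params_py; infer_instance

-- ===== CLAIM (what is proved, stated in full; the proofs are below) =====
def Claim_equal_parse_kotlin_params_py : Prop := ∀ (params_str : String), Dom_parse_kotlin_params_py params_str → Spec_parse_kotlin_params_py params_str (parse_kotlin_params_py params_str)

-- ===== LEMMAS AND PROOFS =====

-- proof-only helpers: the naive comma split, intercalation, and a trailing-comma join
def pvSplitC : List Char → List (List Char)
  | [] => [[]]
  | c :: t => if c = ',' then [] :: pvSplitC t else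
      match pvSplitC t with
      | [] => [[c]]
      | p :: ps => (c :: p) :: ps

def pvIC : List (List Char) → List Char
  | [] => []
  | [a] => a
  | a :: b :: l => a ++ ',' :: pvIC (b :: l)

def pvJT : List (List Char) → List Char
  | [] => []
  | a :: l => a ++ ',' :: pvJT l

theorem pv_dropWhile_idem (p : Char → Bool) (l : List Char) :
    List.dropWhile p (List.dropWhile p l) = List.dropWhile p l := by
  induction l with
  | nil => simp
  | cons a t ih =>
    by_cases hp : p a
    · simp [List.dropWhile_cons, hp, ih]
    · simp [List.dropWhile_cons, hp]

theorem pv_rstrip_idem (s : List Char) :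
    PySem.Chars.rstrip (PySem.Chars.rstrip s) = PySem.Chars.rstrip s := by
  simp [PySem.Chars.rstrip, pv_dropWhile_idem]

theorem pv_dropWhile_take (p : Char → Bool) (l : List Char) (h : List.dropWhile p l = l)
    (n : Nat) : List.dropWhile p (l.take n) = l.take n := by
  cases l with
  | nil => simp
  | cons a t =>
    by_cases hp : p a
    · exfalso
      have h1 : List.dropWhile p (a :: t) = List.dropWhile p t := by
        simp [List.dropWhile_cons, hp]
      have h2 : (List.dropWhile p t).length ≤ t.length := List.length_dropWhile_le p t
      rw [h] at h1
      have := congrArg List.length h1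
      simp at this
      omega
    · cases n with
      | zero => simp
      | succ m => simp [List.take_succ_cons, List.dropWhile_cons, hp]

theorem pv_rstrip_prefix (s : List Char) : ∃ n, PySem.Chars.rstrip s = s.take n := by
  have h1 : List.dropWhile PySem.Chars.isspace s.reverse <:+ s.reverse :=
    List.dropWhile_suffix _
  have h2 : (List.dropWhile PySem.Chars.isspace s.reverse).reverse <+: s := by
    have := (List.reverse_prefix (l₁ := List.dropWhile PySem.Chars.isspace s.reverse)
      (l₂ := s.reverse)).mpr ?_
    · simpa using this
    · simpa using h1
  exact ⟨(List.dropWhile PySem.Chars.isspace s.reverse).reverse.length,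
    by rw [PySem.Chars.rstrip]; exact List.prefix_iff_eq_take.mp h2⟩

theorem pv_strip_idem (s : List Char) :
    PySem.Chars.strip (PySem.Chars.strip s) = PySem.Chars.strip s := by
  simp only [PySem.Chars.strip]
  set y := PySem.Chars.lstrip s with hy
  have hld : List.dropWhile PySem.Chars.isspace y = y := by
    rw [hy]; simp [PySem.Chars.lstrip, pv_dropWhile_idem]
  rcases pv_rstrip_prefix y with ⟨n, hn⟩
  have hls : PySem.Chars.lstrip (PySem.Chars.rstrip y) = PySem.Chars.rstrip y := by
    rw [hn, PySem.Chars.lstrip]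
    exact pv_dropWhile_take _ _ hld n
  rw [hls, pv_rstrip_idem]

-- pvParseA on a stripped argument, on the empty argument, and the A-side flush
theorem pv_parseA_strip (res : List (List (String × String))) (x : List Char) :
    pvParseA res (PySem.Chars.strip x) = pvParseA res x := by
  unfold pvParseA
  rw [pv_strip_idem]

theorem pv_parseA_of_strip_nil (res : List (List (String × String))) (x : List Char)
    (h : PySem.Chars.strip x = []) : pvParseA res x = res := by
  unfold pvParseA
  rw [h]
  have : PySem.Chars.isIn [':', ' '] [] = false := by
    rw [PySem.Chars.isIn_eq_false_iff]; simp
  simp [this]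

theorem pv_parseA_nil (res : List (List (String × String))) : pvParseA res [] = res := by
  apply pv_parseA_of_strip_nil
  decide

theorem pv_flushA (parts : List (List Char)) (cur : List Char)
    (r0 : List (List (String × String))) :
    ((if PySem.Chars.strip cur = [] then parts
      else parts ++ [PySem.Chars.strip cur]).foldl pvParseA r0)
      = pvParseA (parts.foldl pvParseA r0) cur := by
  by_cases h : PySem.Chars.strip cur = []
  · rw [if_pos h, pv_parseA_of_strip_nil _ _ h]
  · rw [if_neg h, List.foldl_append]
    simp only [List.foldl_cons, List.foldl_nil]
    rw [pv_parseA_strip]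

-- B's flush is pvParseA of the re-joined buffer
theorem pv_flushB_eq (res : List (List (String × String))) (acc : List (List Char)) :
    pvFlushB res acc = pvParseA res (PySem.Chars.join [','] acc) := rfl

-- Chars.join [','] is pvIC
theorem pv_join_eq (acc : List (List Char)) : PySem.Chars.join [','] acc = pvIC acc := by
  induction acc with
  | nil => simpa [pvIC] using PySem.Chars.join_nil ([','])
  | cons a l ih =>
    cases l with
    | nil => simpa [pvIC] using PySem.Chars.join_singleton ([',']) a
    | cons b l' =>
      rw [PySem.Chars.join_cons_cons, ih]
      simp [pvIC]

theorem pv_IC_cons (a : List Char) (m : List (List Char)) (h : m ≠ []) :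
    pvIC (a :: m) = a ++ ',' :: pvIC m := by
  cases m with
  | nil => simp at h
  | cons b l => simp [pvIC]

theorem pv_JT_append (acc : List (List Char)) (p : List Char) :
    pvJT acc ++ p = pvIC (acc ++ [p]) := by
  induction acc with
  | nil => simp [pvJT, pvIC]
  | cons a l ih =>
    rw [List.cons_append, pv_IC_cons a (l ++ [p]) (by simp), ← ih]
    simp [pvJT]

theorem pv_IC_comma (acc : List (List Char)) (h : acc ≠ []) :
    pvIC acc ++ [','] = pvJT acc := by
  induction acc with
  | nil => simp at h
  | cons a l ih =>
    cases l with
    | nil => simp [pvIC, pvJT]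
    | cons b l' =>
      simp only [pvIC, pvJT, List.append_assoc, List.cons_append]
      rw [ih (by simp)]
      simp [pvJT]

theorem pv_splitC_ne_nil (l : List Char) : pvSplitC l ≠ [] := by
  cases l with
  | nil => simp [pvSplitC]
  | cons c t =>
    simp only [pvSplitC]
    split_ifs
    · simp
    · cases h : pvSplitC t <;> simp

theorem pv_splitC_nocomma (l : List Char) : ∀ p ∈ pvSplitC l, ',' ∉ p := by
  induction l with
  | nil => simp [pvSplitC]
  | cons c t ih =>
    intro p hp
    cases hsplit : pvSplitC t with
    | nil => exact absurd hsplit (pv_splitC_ne_nil t)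
    | cons q qs =>
      by_cases hc : c = ','
      · simp only [pvSplitC, if_pos hc, hsplit, List.mem_cons] at hp
        rcases hp with rfl | rfl | hp
        · simp
        · exact ih p (by rw [hsplit]; exact List.mem_cons_self)
        · exact ih p (by rw [hsplit]; exact List.mem_cons_of_mem _ hp)
      · simp only [pvSplitC, if_neg hc, hsplit, List.mem_cons] at hp
        rcases hp with rfl | hp
        · intro hmem
          rw [List.mem_cons] at hmem
          rcases hmem with h1 | h1
          · exact hc h1.symm
          · exact ih q (by rw [hsplit]; exact List.mem_cons_self) h1
        · exact ih p (by rw [hsplit]; exact List.mem_cons_of_mem _ hp)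

theorem pv_IC_splitC (l : List Char) : pvIC (pvSplitC l) = l := by
  induction l with
  | nil => simp [pvSplitC, pvIC]
  | cons c t ih =>
    by_cases hc : c = ','
    · subst hc
      simp only [pvSplitC, if_pos rfl]
      cases h : pvSplitC t with
      | nil => exact absurd h (pv_splitC_ne_nil t)
      | cons q qs =>
        rw [h] at ih
        simp [pvIC, ih]
    · simp only [pvSplitC, if_neg hc]
      cases h : pvSplitC t with
      | nil => exact absurd h (pv_splitC_ne_nil t)
      | cons q qs =>
        rw [h] at ih
        cases qs with
        | nil => simp_all [pvIC]
        | cons r rs =>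
          simp only [pvIC] at ih ⊢
          simp [← ih]

-- PySem.Chars.splitOn by a single comma is pvSplitC
theorem pv_splitOn_go (l : List Char) : ∀ (fuel : Nat) (cur : List Char)
    (acc : List (List Char)), l.length ≤ fuel →
    PySem.Chars.splitOn.go [','] fuel l cur acc
      = acc.reverse ++ ((cur.reverse ++ (pvSplitC l).headD []) :: (pvSplitC l).tail) := by
  induction l with
  | nil =>
    intro fuel cur acc _
    cases fuel <;> simp [PySem.Chars.splitOn.go, pvSplitC]
  | cons c t ih =>
    intro fuel cur acc hf
    cases fuel with
    | zero => simp at hf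
    | succ f =>
      by_cases hc : c = ','
      · subst hc
        have hstep : PySem.Chars.splitOn.go [','] (f + 1) (',' :: t) cur acc
            = PySem.Chars.splitOn.go [','] f t [] (cur.reverse :: acc) := by
          simp [PySem.Chars.splitOn.go, List.isPrefixOf]
        rw [hstep, ih f [] (cur.reverse :: acc) (by simp at hf; omega)]
        cases h : pvSplitC t with
        | nil => exact absurd h (pv_splitC_ne_nil t)
        | cons q qs => simp [pvSplitC, h]
      · have hstep : PySem.Chars.splitOn.go [','] (f + 1) (c :: t) cur acc
            = PySem.Chars.splitOn.go [','] f t (c :: cur) acc := by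
          simp [PySem.Chars.splitOn.go, List.isPrefixOf, Ne.symm hc]
        rw [hstep, ih f (c :: cur) acc (by simp at hf; omega)]
        cases h : pvSplitC t with
        | nil => exact absurd h (pv_splitC_ne_nil t)
        | cons q qs => simp [pvSplitC, h, hc]

theorem pv_splitOn_eq (l : List Char) : PySem.Chars.splitOn l [','] = pvSplitC l := by
  unfold PySem.Chars.splitOn
  rw [pv_splitOn_go l (l.length + 1) [] [] (by omega)]
  cases h : pvSplitC l with
  | nil => exact absurd h (pv_splitC_ne_nil l)
  | cons q qs => simp

-- Chars.count by a single char is List.count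
theorem pv_count_go (c : Char) (l : List Char) : ∀ (fuel acc : Nat), l.length ≤ fuel →
    PySem.Chars.count.go [c] fuel l acc = acc + l.count c := by
  induction l with
  | nil =>
    intro fuel acc _
    cases fuel <;> simp [PySem.Chars.count.go]
  | cons h t ih =>
    intro fuel acc hf
    cases fuel with
    | zero => simp at hf
    | succ f =>
      by_cases hc : c = h
      · subst hc
        have hstep : PySem.Chars.count.go [c] (f + 1) (c :: t) acc
            = PySem.Chars.count.go [c] f t (acc + 1) := by
          simp [PySem.Chars.count.go, List.isPrefixOf]
        rw [hstep, ih f (acc + 1) (by simp at hf; omega)]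
        simp [List.count_cons]
        omega
      · have hc2 : ¬ h = c := fun e => hc e.symm
        have hpref : List.isPrefixOf [c] (h :: t) = false := by
          simp [List.isPrefixOf]
          exact hc
        have hstep : PySem.Chars.count.go [c] (f + 1) (h :: t) acc
            = PySem.Chars.count.go [c] f t acc := by
          simp [PySem.Chars.count.go, hpref]
        rw [hstep, ih f acc (by simp at hf; omega)]
        simp [List.count_cons, hc2]

theorem pv_count_eq (c : Char) (l : List Char) :
    PySem.Chars.count l [c] = l.count c := by
  unfold PySem.Chars.count
  rw [if_neg (by simp), pv_count_go c l l.length 0 le_rfl]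
  simp

-- a comma-free chunk through A's splitter loop: depth shifts by the bracket balance
theorem pv_chunkA (p : List Char) (hp : ',' ∉ p) : ∀ (parts : List (List Char)) (d : Int)
    (cur : List Char),
    p.foldl pvStepA (parts, d, cur)
      = (parts, d + ((p.count '<' : Int) - (p.count '>' : Int)), cur ++ p) := by
  induction p with
  | nil => intro parts d cur; simp
  | cons c t ih =>
    intro parts d cur
    have hc : c ≠ ',' := fun h => hp (h ▸ List.mem_cons_self)
    have ht : ',' ∉ t := fun h => hp (List.mem_cons_of_mem _ h)
    simp only [List.foldl_cons]
    by_cases h1 : c = '<'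
    · have hA : pvStepA (parts, d, cur) c = (parts, d + 1, cur ++ [c]) := by
        simp [pvStepA, h1]
      rw [hA, ih ht]
      subst h1
      have h2 : ('<' :: t).count '<' = t.count '<' + 1 := by simp [List.count_cons]
      have h3 : ('<' :: t).count '>' = t.count '>' := by simp [List.count_cons]
      rw [h2, h3]
      simp only [Prod.mk.injEq]
      refine ⟨trivial, by push_cast; ring, by simp⟩
    · by_cases h2 : c = '>'
      · have hA : pvStepA (parts, d, cur) c = (parts, d - 1, cur ++ [c]) := by
          simp [pvStepA, h1, h2]
        rw [hA, ih ht]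
        subst h2
        have h3 : ('>' :: t).count '<' = t.count '<' := by simp [List.count_cons, h1]
        have h4 : ('>' :: t).count '>' = t.count '>' + 1 := by simp [List.count_cons]
        rw [h3, h4]
        simp only [Prod.mk.injEq]
        refine ⟨trivial, by push_cast; ring, by simp⟩
      · have hA : pvStepA (parts, d, cur) c = (parts, d, cur ++ [c]) := by
          simp [pvStepA, h1, h2, hc]
        rw [hA, ih ht]
        have h3 : (c :: t).count '<' = t.count '<' := by
          simp [List.count_cons]; intro h; exact absurd h h1
        have h4 : (c :: t).count '>' = t.count '>' := by
          simp [List.count_cons]; intro h; exact absurd h h2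
        rw [h3, h4]
        simp

-- A's splitter step at a comma
theorem pv_stepA_comma (parts : List (List Char)) (d : Int) (cur : List Char) :
    pvStepA (parts, d, cur) ','
      = if d = 0 then
          ((if PySem.Chars.strip cur = [] then parts else parts ++ [PySem.Chars.strip cur]),
            d, [])
        else (parts, d, cur ++ [',']) := by
  by_cases hd : d = 0
  · simp [pvStepA, hd]
  · simp [pvStepA, hd]

-- the main alignment: B's fold over the comma-split pieces vs A's fold over their intercalation
theorem pv_main (ps : List (List Char)) (hps : ∀ p ∈ ps, ',' ∉ p) (hne : ps ≠ []) :
    ∀ (parts : List (List Char)) (bal : Int) (acc : List (List Char))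
      (r0 : List (List (String × String))),
    pvParseA ((ps.foldl pvStepB (parts.foldl pvParseA r0, bal, acc)).1)
        (pvIC ((ps.foldl pvStepB (parts.foldl pvParseA r0, bal, acc)).2.2))
      = pvParseA ((((pvIC ps).foldl pvStepA (parts, bal, pvJT acc)).1).foldl pvParseA r0)
          ((pvIC ps).foldl pvStepA (parts, bal, pvJT acc)).2.2 := by
  induction ps with
  | nil => exact absurd rfl hne
  | cons p ps' ih =>
    intro parts bal acc r0
    have hp : ',' ∉ p := hps p List.mem_cons_self
    have hB1 : (p :: ps').foldl pvStepB (parts.foldl pvParseA r0, bal, acc)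
        = ps'.foldl pvStepB (pvStepB (parts.foldl pvParseA r0, bal, acc) p) := by
      simp
    set bal' : Int := bal + (PySem.Chars.count p ['<'] : Int)
        - (PySem.Chars.count p ['>'] : Int) with hbal'
    have hbal'' : bal' = bal + ((p.count '<' : Int) - (p.count '>' : Int)) := by
      rw [hbal', pv_count_eq, pv_count_eq]; ring
    have hstepB : pvStepB (parts.foldl pvParseA r0, bal, acc) p
        = if bal' = 0 then (pvFlushB (parts.foldl pvParseA r0) (acc ++ [p]), bal', [])
          else (parts.foldl pvParseA r0, bal', acc ++ [p]) := by
      simp [pvStepB, hbal']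
    cases ps' with
    | nil =>
      -- last piece: both sides only flush at the very end
      have hA : (pvIC [p]).foldl pvStepA (parts, bal, pvJT acc)
          = (parts, bal', pvIC (acc ++ [p])) := by
        show p.foldl pvStepA (parts, bal, pvJT acc) = _
        rw [pv_chunkA p hp, pv_JT_append, hbal'']
      rw [hA]
      simp only [List.foldl_cons, List.foldl_nil, hstepB]
      by_cases h0 : bal' = 0
      · rw [if_pos h0]
        simp only [pvIC]
        rw [pv_parseA_nil, pv_flushB_eq, pv_join_eq]
      · rw [if_neg h0]
    | cons q ps'' =>
      have hIC : pvIC (p :: q :: ps'') = p ++ ',' :: pvIC (q :: ps'') := by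
        simp [pvIC]
      have hA1 : (pvIC (p :: q :: ps'')).foldl pvStepA (parts, bal, pvJT acc)
          = (pvIC (q :: ps'')).foldl pvStepA
              (pvStepA (parts, bal', pvIC (acc ++ [p])) ',') := by
        rw [hIC, List.foldl_append, pv_chunkA p hp, ← hbal'', pv_JT_append]
        simp
      have hps'' : ∀ x ∈ (q :: ps''), ',' ∉ x := fun x hx =>
        hps x (List.mem_cons_of_mem _ hx)
      by_cases h0 : bal' = 0
      · have hAc : pvStepA (parts, bal', pvIC (acc ++ [p])) ','
            = ((if PySem.Chars.strip (pvIC (acc ++ [p])) = [] then parts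
                else parts ++ [PySem.Chars.strip (pvIC (acc ++ [p]))]), bal', []) := by
          rw [pv_stepA_comma, if_pos h0]
        have hres : (if PySem.Chars.strip (pvIC (acc ++ [p])) = [] then parts
              else parts ++ [PySem.Chars.strip (pvIC (acc ++ [p]))]).foldl pvParseA r0
            = pvFlushB (parts.foldl pvParseA r0) (acc ++ [p]) := by
          rw [pv_flushA, pv_flushB_eq, pv_join_eq]
        rw [hB1, hstepB, if_pos h0, hA1, hAc]
        have := ih hps'' (by simp)
          (if PySem.Chars.strip (pvIC (acc ++ [p])) = [] then parts
            else parts ++ [PySem.Chars.strip (pvIC (acc ++ [p]))]) bal' [] r0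
        rw [hres] at this
        simpa [pvJT] using this
      · have hAc : pvStepA (parts, bal', pvIC (acc ++ [p])) ','
            = (parts, bal', pvJT (acc ++ [p])) := by
          rw [pv_stepA_comma, if_neg h0, pv_IC_comma _ (by simp)]
        rw [hB1, hstepB, if_neg h0, hA1, hAc]
        exact ih hps'' (by simp) parts bal' (acc ++ [p]) r0

-- ===== VERDICT (by name: the statement is the Claim_ definition above) =====
theorem parse_kotlin_params_py_spec : Claim_equal_parse_kotlin_params_py := by
  intro s _
  unfold Spec_parse_kotlin_params_py parse_kotlin_params_py parse_kotlin_params_py_alt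
    pvSplitKotlin
  rw [pv_splitOn_eq]
  have hA : (if PySem.Chars.strip ((s.toList.foldl pvStepA ([], 0, [])).2.2) = []
        then (s.toList.foldl pvStepA ([], 0, [])).1
        else (s.toList.foldl pvStepA ([], 0, [])).1
          ++ [PySem.Chars.strip ((s.toList.foldl pvStepA ([], 0, [])).2.2)]).foldl pvParseA []
      = pvParseA (((s.toList.foldl pvStepA ([], 0, [])).1).foldl pvParseA [])
          (s.toList.foldl pvStepA ([], 0, [])).2.2 := pv_flushA _ _ _
  have hmain := pv_main (pvSplitC s.toList) (pv_splitC_nocomma s.toList)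
    (pv_splitC_ne_nil s.toList) [] 0 [] []
  rw [pv_IC_splitC] at hmain
  simp only [List.foldl_nil, pvJT] at hmain
  rw [pv_flushB_eq, pv_join_eq]
  simpa [hA] using hmain.symm
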